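-- pv_equiv track=rewrite | github.com/FREDY1969/tampa-bay-python-avr | algorithms/depth_first.py | bruce_version
-- ===== SOURCE A (Python) =====
-- def bruce_version(G, root):
--     r'''
--         >>> list(reversed(tuple(bruce_version(example1, 'a'))))
--         ['a', 'e', 'f', 'b', 'd', 'c']
--     '''
--     def gen(n):
--         visited.add(n)
--         for s in G.get(n, ()):
--             if s not in visited:
--                 for x in gen(s): yield x
--         yield n
--     visited = set()
--     return gen(root)
-- ===== SOURCE B (Python) =====
-- def bruce_version(G, root):
--     # Iterative DFS with an explicit stack of (node, successor-iterator) frames;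
--     # yields each node after all its frames' successors are done (post-order).
--     def gen():
--         visited = {root}
--         stack = [(root, iter(G.get(root, ())))]
--         _done = object()
--         while stack:
--             node, it = stack[-1]
--             s = next(it, _done)
--             if s is _done:
--                 yield node
--                 stack.pop()
--             elif s not in visited:
--                 visited.add(s)
--                 stack.append((s, iter(G.get(s, ()))))
--     return gen()
-- ===== Notes on version B (the rewrite author's own statement) =====
-- stated objective: alternative
-- what changed: B replaces A's recursive generator (nested 'yield from' frames, implicit call stack) by an iterative DFS that maintains an explicit stack of (node, successor-iterator) frames with a shared visited set, yielding each node when its frame's iterator is exhausted.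
import Mathlib
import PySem

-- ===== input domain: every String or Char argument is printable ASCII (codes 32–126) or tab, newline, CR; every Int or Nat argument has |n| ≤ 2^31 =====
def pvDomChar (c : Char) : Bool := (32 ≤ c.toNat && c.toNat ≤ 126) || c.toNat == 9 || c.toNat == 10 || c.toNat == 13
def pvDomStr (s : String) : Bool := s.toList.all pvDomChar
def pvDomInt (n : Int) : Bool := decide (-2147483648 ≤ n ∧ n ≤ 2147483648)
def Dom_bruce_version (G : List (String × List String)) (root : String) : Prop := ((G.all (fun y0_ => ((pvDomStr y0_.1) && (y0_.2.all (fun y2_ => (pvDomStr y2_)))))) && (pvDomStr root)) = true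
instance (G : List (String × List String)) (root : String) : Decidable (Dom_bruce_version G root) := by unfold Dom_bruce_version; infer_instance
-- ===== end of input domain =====

-- B replaces A's recursive post-order DFS generator by an iterative one over an explicit
-- stack of (node, remaining-successors) frames; equivalence of returned values is proved.

-- all strings occurring in the graph (keys and successors); used for A's fuel bound and B's termination measure
def pvStrs (l : List (String × List String)) : List String := l.flatMap (fun p => p.1 :: p.2)

theorem pvStrs_cons (p : String × List String) (l : List (String × List String)) :
    pvStrs (p :: l) = p.1 :: (p.2 ++ pvStrs l) := by simp [pvStrs]

-- G.get(n, ()) — first-match association-list lookup, shared by both ports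
def pvSuccs (G : List (String × List String)) (n : String) : List String :=
  PySem.Dict.getD (PySem.Dict.mk G) n []

theorem mem_pvSuccs_strs (G : List (String × List String)) (s x : String)
    (hx : x ∈ pvSuccs G s) : x ∈ pvStrs G := by
  unfold pvSuccs PySem.Dict.getD PySem.Dict.get? at hx
  cases hfind : List.find? (fun p => p.1 == s) (PySem.Dict.mk G).items with
  | none => rw [hfind] at hx; simp at hx
  | some p =>
    rw [hfind] at hx
    simp only [Option.map_some, Option.getD_some] at hx
    have hp : p ∈ G := List.mem_of_find?_eq_some hfind
    simp only [pvStrs, List.mem_flatMap]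
    exact ⟨p, hp, by simp [hx]⟩

-- ===== PORT A =====
-- A's gen(n) does: visited.add(n); for s in G.get(n,()): if s not in visited: yield from gen(s); yield n.
-- goSuccA is the successor loop of gen(n) (returning the loop's yields and the updated visited set).
-- The fuel is only a totality guard: it is proved sufficient below, so the `none` branch is never taken.
def goSuccA (G : List (String × List String)) (fuel : Nat) (vis : PySem.Set String)
    (ss : List String) : Option (List String × PySem.Set String) :=
  match ss with
  | [] => some ([], vis)
  | s :: rest =>
    if PySem.Set.contains vis s then goSuccA G fuel vis rest
    else
      match fuel with
      | 0 => none
      | f + 1 =>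
        match goSuccA G f (PySem.Set.add vis s) (pvSuccs G s) with
        | none => none
        | some (ys1, vis1) =>
          match goSuccA G (f + 1) vis1 rest with
          | none => none
          | some (ys2, vis2) => some (ys1 ++ [s] ++ ys2, vis2)
termination_by (fuel, ss.length)

def bruce_version (G : List (String × List String)) (root : String) : List String :=
  match goSuccA G ((pvStrs G).length + 2) (PySem.Set.add PySem.Set.empty root) (pvSuccs G root) with
  | some (ys, _) => ys ++ [root]
  | none => []

-- ===== PORT B =====
-- termination measure for the stack machine: unvisited strings of the graph and the stack
def pvMeas (G : List (String × List String)) (vis : PySem.Set String)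
    (st : List (String × List String)) : Nat :=
  ((pvStrs G ++ pvStrs st).toFinset \ vis.toFinset).card

theorem pvMeas_mono (G : List (String × List String)) (vis : PySem.Set String)
    (st st' : List (String × List String)) (h : ∀ x ∈ pvStrs st', x ∈ pvStrs st) :
    pvMeas G vis st' ≤ pvMeas G vis st := by
  apply Finset.card_le_card
  intro x hx
  simp only [Finset.mem_sdiff, List.mem_toFinset, List.mem_append] at hx ⊢
  exact ⟨hx.1.elim Or.inl (fun hh => Or.inr (h x hh)), hx.2⟩

theorem pvMeas_push (G : List (String × List String)) (vis : PySem.Set String)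
    (n s : String) (rest : List String) (frames : List (String × List String))
    (hs : PySem.Set.contains vis s = false) :
    pvMeas G (PySem.Set.add vis s) ((s, pvSuccs G s) :: (n, rest) :: frames)
      < pvMeas G vis ((n, s :: rest) :: frames) := by
  have hsv : s ∉ vis := by
    simpa [PySem.Set.contains, List.contains_eq_mem] using hs
  have hadd : PySem.Set.add vis s = vis ++ [s] := by
    simp [PySem.Set.add, hsv]
  have hsU : s ∈ (pvStrs G ++ pvStrs ((n, s :: rest) :: frames)).toFinset \ vis.toFinset := by
    simp [pvStrs_cons, hsv]
  have hsub : (pvStrs G ++ pvStrs ((s, pvSuccs G s) :: (n, rest) :: frames)).toFinset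
        \ (PySem.Set.add vis s).toFinset
      ⊆ ((pvStrs G ++ pvStrs ((n, s :: rest) :: frames)).toFinset \ vis.toFinset).erase s := by
    intro x hx
    rw [hadd] at hx
    simp only [Finset.mem_sdiff, List.mem_toFinset, List.mem_append, List.mem_cons,
      List.not_mem_nil, or_false] at hx
    obtain ⟨hin, hnv⟩ := hx
    have hxs : x ≠ s := fun he => hnv (Or.inr he)
    have hxv : x ∉ vis := fun hv => hnv (Or.inl hv)
    simp only [Finset.mem_erase, Finset.mem_sdiff, List.mem_toFinset, List.mem_append]
    refine ⟨hxs, ?_, hxv⟩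
    rcases hin with h | h
    · exact Or.inl h
    · simp only [pvStrs_cons, List.mem_cons, List.mem_append] at h
      rcases h with he | hsucc | hn | hrest | hfr
      · exact absurd he hxs
      · exact Or.inl (mem_pvSuccs_strs G s x hsucc)
      · refine Or.inr ?_; simp [pvStrs_cons, hn]
      · refine Or.inr ?_; simp [pvStrs_cons, hrest]
      · refine Or.inr ?_; simp [pvStrs_cons, hfr]
  calc pvMeas G (PySem.Set.add vis s) ((s, pvSuccs G s) :: (n, rest) :: frames)
      ≤ (((pvStrs G ++ pvStrs ((n, s :: rest) :: frames)).toFinset \ vis.toFinset).erase s).card :=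
        Finset.card_le_card hsub
    _ < pvMeas G vis ((n, s :: rest) :: frames) := by
        unfold pvMeas
        exact Finset.card_erase_lt_of_mem hsU

-- B's loop: a stack of (node, remaining-successors) frames, a shared visited set,
-- an accumulator of the yields so far.
def runStack (G : List (String × List String)) (vis : PySem.Set String)
    (st : List (String × List String)) (acc : List String) : List String :=
  match st with
  | [] => acc
  | (n, []) :: frames => runStack G vis frames (acc ++ [n])
  | (n, s :: rest) :: frames =>
    if h : PySem.Set.contains vis s then runStack G vis ((n, rest) :: frames) acc
    else runStack G (PySem.Set.add vis s) ((s, pvSuccs G s) :: (n, rest) :: frames) acc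
termination_by (pvMeas G vis st, (st.map (fun p => p.2.length)).sum, st.length)
decreasing_by
  · -- pop an exhausted frame: measure ≤, successor sums equal, stack shorter
    simp only [List.map_cons, List.sum_cons, List.length_cons, List.length_nil, zero_add]
    have h1 : pvMeas G vis frames ≤ pvMeas G vis ((n, []) :: frames) :=
      pvMeas_mono G vis _ _ (by
        intro x hx
        rw [pvStrs_cons]
        exact List.mem_cons_of_mem _ (List.mem_append_right _ hx))
    rcases lt_or_eq_of_le h1 with h | h
    · exact Prod.Lex.left _ _ h
    · rw [h]; exact Prod.Lex.right _ (Prod.Lex.right _ (by omega))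
  · -- skip a visited successor: measure ≤, successor sum strictly smaller
    simp only [List.map_cons, List.sum_cons, List.length_cons]
    have h1 : pvMeas G vis ((n, rest) :: frames) ≤ pvMeas G vis ((n, s :: rest) :: frames) :=
      pvMeas_mono G vis _ _ (by
        intro x hx
        simp only [pvStrs_cons, List.mem_cons, List.mem_append] at hx ⊢
        tauto)
    rcases lt_or_eq_of_le h1 with h2 | h2
    · exact Prod.Lex.left _ _ h2
    · rw [h2]; exact Prod.Lex.right _ (Prod.Lex.left _ _ (by omega))
  · -- push an unvisited successor: measure strictly smaller
    exact Prod.Lex.left _ _ (pvMeas_push G vis n s rest frames (by simpa using h))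

def bruce_version_alt (G : List (String × List String)) (root : String) : List String :=
  runStack G (PySem.Set.add PySem.Set.empty root) [(root, pvSuccs G root)] []

-- ===== PRECONDITION & SPEC =====
def Spec_bruce_version (G : List (String × List String)) (root : String) (out : List String) : Prop := out = bruce_version_alt G root
instance (G : List (String × List String)) (root : String) (out : List String) : Decidable (Spec_bruce_version G root out) := by unfold Spec_bruce_version; infer_instance

-- ===== CLAIM (what is proved, stated in full; the proofs are below) =====
def Claim_equal_bruce_version : Prop := ∀ (G : List (String × List String)) (root : String), Dom_bruce_version G root → Spec_bruce_version G root (bruce_version G root)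

-- ===== LEMMAS AND PROOFS =====

-- number of strings of G not yet visited: A's fuel budget
def pvPhi (G : List (String × List String)) (vis : PySem.Set String) : Nat :=
  ((pvStrs G).toFinset \ vis.toFinset).card

theorem pvPhi_mono (G : List (String × List String)) (vis vis' : PySem.Set String)
    (h : ∀ x ∈ vis, x ∈ vis') : pvPhi G vis' ≤ pvPhi G vis := by
  apply Finset.card_le_card
  intro x hx
  simp only [Finset.mem_sdiff, List.mem_toFinset] at hx ⊢
  exact ⟨hx.1, fun hv => hx.2 (h x hv)⟩

theorem pvPhi_add_lt (G : List (String × List String)) (vis : PySem.Set String) (s : String)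
    (hsG : s ∈ pvStrs G) (hsv : s ∉ vis) : pvPhi G (PySem.Set.add vis s) < pvPhi G vis := by
  have hadd : PySem.Set.add vis s = vis ++ [s] := by
    simp [PySem.Set.add, PySem.Set.contains, List.contains_eq_mem, hsv]
  have hsub : (pvStrs G).toFinset \ (PySem.Set.add vis s).toFinset
      ⊆ ((pvStrs G).toFinset \ vis.toFinset).erase s := by
    intro x hx
    rw [hadd] at hx
    simp only [Finset.mem_sdiff, List.mem_toFinset, List.mem_append, List.mem_cons,
      List.not_mem_nil, or_false] at hx
    obtain ⟨hin, hnv⟩ := hx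
    simp only [Finset.mem_erase, Finset.mem_sdiff, List.mem_toFinset]
    exact ⟨fun he => hnv (Or.inr he), hin, fun hv => hnv (Or.inl hv)⟩
  have hsm : s ∈ (pvStrs G).toFinset \ vis.toFinset := by simp [hsG, hsv]
  calc pvPhi G (PySem.Set.add vis s)
      ≤ (((pvStrs G).toFinset \ vis.toFinset).erase s).card := Finset.card_le_card hsub
    _ < pvPhi G vis := Finset.card_erase_lt_of_mem hsm

theorem mem_add_of_mem (vis : PySem.Set String) (s x : String) (hx : x ∈ vis) :
    x ∈ PySem.Set.add vis s := by
  simp only [PySem.Set.add]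
  split
  · exact hx
  · simp [hx]

-- the visited set only grows along goSuccA
theorem goSuccA_subset (G : List (String × List String)) :
    ∀ (fuel : Nat) (ss : List String) (vis : PySem.Set String) (ys : List String)
      (vis' : PySem.Set String), goSuccA G fuel vis ss = some (ys, vis') →
      ∀ x ∈ vis, x ∈ vis' := by
  intro fuel
  induction fuel using Nat.strong_induction_on with
  | _ fuel IHf =>
    intro ss
    induction ss with
    | nil =>
      intro vis ys vis' h x hx
      rw [goSuccA.eq_def] at h
      simp only [Option.some.injEq, Prod.mk.injEq] at h
      rw [← h.2]; exact hx
    | cons s rest IHss =>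
      intro vis ys vis' h x hx
      rw [goSuccA.eq_def] at h
      dsimp only at h
      by_cases hc : PySem.Set.contains vis s = true
      · rw [if_pos hc] at h
        exact IHss vis ys vis' h x hx
      · rw [if_neg hc] at h
        cases fuel with
        | zero => simp at h
        | succ f =>
          dsimp only at h
          cases hg : goSuccA G f (PySem.Set.add vis s) (pvSuccs G s) with
          | none => rw [hg] at h; simp at h
          | some p =>
            obtain ⟨ys1, vis1⟩ := p
            rw [hg] at h
            dsimp only at h
            cases hg2 : goSuccA G (f + 1) vis1 rest with
            | none => rw [hg2] at h; simp at h
            | some q =>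
              obtain ⟨ys2, vis2⟩ := q
              rw [hg2] at h
              dsimp only at h
              simp only [Option.some.injEq, Prod.mk.injEq] at h
              have h1 : x ∈ vis1 :=
                IHf f (by omega) (pvSuccs G s) (PySem.Set.add vis s) ys1 vis1 hg x
                  (mem_add_of_mem vis s x hx)
              have h2 : x ∈ vis2 := IHss vis1 ys2 vis2 hg2 x h1
              rw [← h.2]; exact h2

-- fuel adequacy: with fuel ≥ pvPhi, goSuccA never runs out
theorem goSuccA_isSome (G : List (String × List String)) :
    ∀ (fuel : Nat) (ss : List String) (vis : PySem.Set String),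
      (∀ s ∈ ss, s ∈ pvStrs G) → pvPhi G vis ≤ fuel → (goSuccA G fuel vis ss).isSome := by
  intro fuel
  induction fuel using Nat.strong_induction_on with
  | _ fuel IHf =>
    intro ss
    induction ss with
    | nil => intro vis _ _; rw [goSuccA.eq_def]; simp
    | cons s rest IHss =>
      intro vis hss hfuel
      rw [goSuccA.eq_def]
      dsimp only
      by_cases hc : PySem.Set.contains vis s = true
      · rw [if_pos hc]
        exact IHss vis (fun t ht => hss t (by simp [ht])) hfuel
      · rw [if_neg hc]
        have hsG : s ∈ pvStrs G := hss s (by simp)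
        have hsv : s ∉ vis := fun hmem =>
          hc (by simp [PySem.Set.contains, List.contains_eq_mem, hmem])
        have hlt : pvPhi G (PySem.Set.add vis s) < pvPhi G vis := pvPhi_add_lt G vis s hsG hsv
        cases fuel with
        | zero => exfalso; omega
        | succ f =>
          dsimp only
          have h1 : (goSuccA G f (PySem.Set.add vis s) (pvSuccs G s)).isSome :=
            IHf f (by omega) (pvSuccs G s) (PySem.Set.add vis s)
              (fun t ht => mem_pvSuccs_strs G s t ht) (by omega)
          cases hg : goSuccA G f (PySem.Set.add vis s) (pvSuccs G s) with
          | none => rw [hg] at h1; simp at h1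
          | some p =>
            obtain ⟨ys1, vis1⟩ := p
            have hsub1 : ∀ x ∈ PySem.Set.add vis s, x ∈ vis1 :=
              goSuccA_subset G f (pvSuccs G s) (PySem.Set.add vis s) ys1 vis1 hg
            have hphi1 : pvPhi G vis1 ≤ pvPhi G (PySem.Set.add vis s) :=
              pvPhi_mono G _ _ hsub1
            have h2 : (goSuccA G (f + 1) vis1 rest).isSome :=
              IHss vis1 (fun t ht => hss t (by simp [ht])) (by omega)
            cases hg2 : goSuccA G (f + 1) vis1 rest with
            | none => rw [hg2] at h2; simp at h2
            | some q => obtain ⟨ys2, vis2⟩ := q; simp [hg2]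

-- simulation: the stack machine runs A's successor loop
theorem runStack_sim (G : List (String × List String)) :
    ∀ (fuel : Nat) (ss : List String) (vis : PySem.Set String) (ys : List String)
      (vis' : PySem.Set String), goSuccA G fuel vis ss = some (ys, vis') →
      ∀ (n : String) (frames : List (String × List String)) (acc : List String),
        runStack G vis ((n, ss) :: frames) acc = runStack G vis' frames (acc ++ ys ++ [n]) := by
  intro fuel
  induction fuel using Nat.strong_induction_on with
  | _ fuel IHf =>
    intro ss
    induction ss with
    | nil =>
      intro vis ys vis' h n frames acc
      rw [goSuccA.eq_def] at h
      simp only [Option.some.injEq, Prod.mk.injEq] at h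
      rw [runStack.eq_def]
      dsimp only
      rw [← h.1, ← h.2]
      simp
    | cons s rest IHss =>
      intro vis ys vis' h n frames acc
      rw [goSuccA.eq_def] at h
      dsimp only at h
      by_cases hc : PySem.Set.contains vis s = true
      · rw [if_pos hc] at h
        rw [runStack.eq_def]
        dsimp only
        rw [dif_pos hc]
        exact IHss vis ys vis' h n frames acc
      · rw [if_neg hc] at h
        cases fuel with
        | zero => simp at h
        | succ f =>
          dsimp only at h
          cases hg : goSuccA G f (PySem.Set.add vis s) (pvSuccs G s) with
          | none => rw [hg] at h; simp at h
          | some p =>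
            obtain ⟨ys1, vis1⟩ := p
            rw [hg] at h
            dsimp only at h
            cases hg2 : goSuccA G (f + 1) vis1 rest with
            | none => rw [hg2] at h; simp at h
            | some q =>
              obtain ⟨ys2, vis2⟩ := q
              rw [hg2] at h
              dsimp only at h
              simp only [Option.some.injEq, Prod.mk.injEq] at h
              rw [runStack.eq_def]
              dsimp only
              rw [dif_neg hc]
              rw [IHf f (by omega) (pvSuccs G s) (PySem.Set.add vis s) ys1 vis1 hg s
                ((n, rest) :: frames) acc]
              rw [IHss vis1 ys2 vis2 hg2 n frames (acc ++ ys1 ++ [s])]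
              rw [← h.1, ← h.2]
              simp

-- ===== VERDICT (by name: the statement is the Claim_ definition above) =====
theorem bruce_version_spec : Claim_equal_bruce_version := by
  intro G root _
  unfold Spec_bruce_version
  have hss : ∀ s ∈ pvSuccs G root, s ∈ pvStrs G := fun s hs => mem_pvSuccs_strs G root s hs
  have hphi : pvPhi G (PySem.Set.add PySem.Set.empty root) ≤ (pvStrs G).length + 2 := by
    have h1 : pvPhi G (PySem.Set.add PySem.Set.empty root) ≤ (pvStrs G).toFinset.card :=
      Finset.card_le_card Finset.sdiff_subset
    have h2 : (pvStrs G).toFinset.card ≤ (pvStrs G).length := List.toFinset_card_le _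
    omega
  have hsome := goSuccA_isSome G ((pvStrs G).length + 2)
    (pvSuccs G root) (PySem.Set.add PySem.Set.empty root) hss hphi
  obtain ⟨⟨ys, visf⟩, hg⟩ := Option.isSome_iff_exists.mp hsome
  have hA : bruce_version G root = ys ++ [root] := by
    unfold bruce_version
    rw [hg]
  have hB : bruce_version_alt G root = ys ++ [root] := by
    unfold bruce_version_alt
    rw [runStack_sim G ((pvStrs G).length + 2) (pvSuccs G root)
      (PySem.Set.add PySem.Set.empty root) ys visf hg root [] []]
    rw [runStack.eq_def]
    simp
  rw [hA, hB]
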